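-- pv_equiv track=rewrite | github.com/info164/python_vigenere_122 | vigenere.py | decalage
-- ===== SOURCE A (Python) =====
-- def lettre(c):
--     # retourne vrai si c est une lettre non accentuee
--     car = ord(c.upper())
--     return 64 < car < 91
--
-- def decalage(c, k):
--     # decale une lettre majuscule. Les autres caracteres ne sont pas modifies
--     car = ord(c.upper())
--     if lettre(c):
--         car += k
--         while car > 90:
--             car -= 26
--         while car < 65:
--             car += 26
--         return chr(car)
--     else:
--         return ""
-- ===== SOURCE B (Python) =====
-- def decalage(c, k):
--     # decale une lettre majuscule par arithmetique modulaire ; les autres caracteres donnent ""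
--     car = ord(c.upper())
--     if 64 < car < 91:
--         return chr(65 + (car - 65 + k) % 26)
--     return ""
-- ===== Notes on version B (the rewrite author's own statement) =====
-- stated objective: simpler
-- what changed: Replaces the two iterative while-loop wraps (repeatedly adding/subtracting 26) with a single closed-form modular computation chr(65 + (car - 65 + k) % 26), inlining the letter test.
import Mathlib
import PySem

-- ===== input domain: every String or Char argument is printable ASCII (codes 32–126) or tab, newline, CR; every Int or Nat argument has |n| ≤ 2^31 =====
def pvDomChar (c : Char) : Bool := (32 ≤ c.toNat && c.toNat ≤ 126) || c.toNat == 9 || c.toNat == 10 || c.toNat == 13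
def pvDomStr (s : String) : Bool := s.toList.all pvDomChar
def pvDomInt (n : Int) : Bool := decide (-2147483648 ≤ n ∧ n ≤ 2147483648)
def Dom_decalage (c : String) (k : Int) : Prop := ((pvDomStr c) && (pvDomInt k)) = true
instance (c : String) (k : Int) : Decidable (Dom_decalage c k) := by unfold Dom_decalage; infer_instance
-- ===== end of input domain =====

-- B replaces A's two while-loop wraps by one closed-form modular step (simpler; no speed claim proved).

-- ===== PORT A =====
-- ord(c.upper()) for a one-character string c (Pre_ requires length 1, where Python's ord is defined)
def pvOrdUpper (c : String) : Int :=
  (((PySem.Chars.upper c.toList).headD ' ').toNat : Int)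

def lettreA (c : String) : Bool :=
  let car := pvOrdUpper c
  decide (64 < car ∧ car < 91)

-- while car > 90: car -= 26
def pvWhileDown (car : Int) : Int :=
  if car > 90 then pvWhileDown (car - 26) else car
termination_by (car - 90).toNat
decreasing_by omega

-- while car < 65: car += 26
def pvWhileUp (car : Int) : Int :=
  if car < 65 then pvWhileUp (car + 26) else car
termination_by (65 - car).toNat
decreasing_by omega

def decalage (c : String) (k : Int) : String :=
  let car := pvOrdUpper c
  if lettreA c then
    let car1 := car + k
    let car2 := pvWhileDown car1
    let car3 := pvWhileUp car2
    String.mk [Char.ofNat car3.toNat]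
  else ""

-- ===== PORT B =====
def decalage_alt (c : String) (k : Int) : String :=
  let car : Int := (((PySem.Chars.upper c.toList).headD ' ').toNat : Int)
  if 64 < car ∧ car < 91 then
    String.mk [Char.ofNat (65 + PySem.Int.mod (car - 65 + k) 26).toNat]
  else ""

-- ===== PRECONDITION & SPEC =====
-- Pre_ excludes strings whose length is not 1, on which Python's ord (hence A) raises TypeError.
def Pre_decalage (c : String) (k : Int) : Prop := c.toList.length = 1
instance (c : String) (k : Int) : Decidable (Pre_decalage c k) := by unfold Pre_decalage; infer_instance
def pvWitness_decalage : String × Int := ("a", 3)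

def Spec_decalage (c : String) (k : Int) (out : String) : Prop := out = decalage_alt c k
instance (c : String) (k : Int) (out : String) : Decidable (Spec_decalage c k out) := by unfold Spec_decalage; infer_instance

-- ===== CLAIM (what is proved, stated in full; the proofs are below) =====
def Claim_equal_decalage : Prop := ∀ (c : String) (k : Int), Dom_decalage c k → Pre_decalage c k → Spec_decalage c k (decalage c k)

-- ===== LEMMAS AND PROOFS =====

theorem pvWhileDown_spec (x : Int) :
    pvWhileDown x ≤ 90 ∧ pvWhileDown x % 26 = x % 26 ∧ (65 ≤ x → 65 ≤ pvWhileDown x) := by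
  induction x using pvWhileDown.induct with
  | case1 x h ih =>
    rw [pvWhileDown, if_pos h]
    refine ⟨ih.1, ?_, fun _ => ih.2.2 (by omega)⟩
    rw [ih.2.1, Int.sub_emod_right]
  | case2 x h =>
    rw [pvWhileDown, if_neg h]
    exact ⟨by omega, rfl, fun hx => hx⟩

theorem pvWhileUp_spec (x : Int) (hx : x ≤ 90) :
    65 ≤ pvWhileUp x ∧ pvWhileUp x ≤ 90 ∧ pvWhileUp x % 26 = x % 26 := by
  induction x using pvWhileUp.induct with
  | case1 x h ih =>
    rw [pvWhileUp, if_pos h]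
    have := ih (by omega)
    exact ⟨this.1, this.2.1, by rw [this.2.2, Int.add_emod_right]⟩
  | case2 x h =>
    rw [pvWhileUp, if_neg h]
    exact ⟨by omega, hx, rfl⟩

theorem pvWrap_eq_mod (car k : Int) :
    pvWhileUp (pvWhileDown (car + k)) = 65 + PySem.Int.mod (car - 65 + k) 26 := by
  have hd := pvWhileDown_spec (car + k)
  have hu := pvWhileUp_spec (pvWhileDown (car + k)) hd.1
  rw [PySem.Int.mod_eq_emod_of_pos (by norm_num)]
  have h1 := hd.2.1
  have h2 := hu.2.2
  omega

-- ===== VERDICT (by name: the statement is the Claim_ definition above) =====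
theorem decalage_spec : Claim_equal_decalage := by
  intro c k _ _
  unfold Spec_decalage decalage decalage_alt lettreA pvOrdUpper
  simp only []
  by_cases h : 64 < (((PySem.Chars.upper c.toList).headD ' ').toNat : Int) ∧
      (((PySem.Chars.upper c.toList).headD ' ').toNat : Int) < 91
  · rw [if_pos (by exact decide_eq_true h), if_pos h, pvWrap_eq_mod]
  · rw [if_neg (by simpa using h), if_neg h]
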